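-- pv_equiv track=rewrite | github.com/darrondai/advent-of-code | year-2025/day-4/accessible_rolls.py | initialize_indegrees_by_roll
-- ===== SOURCE A (Python) =====
-- def initialize_indegrees_by_roll(
--     paper_roll_grid: list[str],
-- ) -> dict[tuple[int, int], int]:
--     indegrees_by_roll: dict[tuple[int, int], int] = {}
--
--     # initial traversal, marking the paper rolls
--     for row, s in enumerate(paper_roll_grid):
--         for col, char in enumerate(s):
--             if char == "@":
--                 indegrees_by_roll[(row, col)] = 0
--
--     # additional traversal through paper rolls, calc indegree
--     def calc_indegree(
--         cell: tuple[int, int], indegrees_by_roll: dict[tuple[int, int], int]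
--     ) -> int:
--         indegree = 0
--         for neighbor in get_neighbors(cell):
--             if neighbor not in indegrees_by_roll:
--                 continue
--             indegree += 1
--         return indegree
--
--     for roll in indegrees_by_roll:
--         indegrees_by_roll[roll] = calc_indegree(roll, indegrees_by_roll)
--     return indegrees_by_roll
--
-- def get_neighbors(cell: tuple[int, int]) -> list[tuple[int, int]]:
--     DIRECTIONS = (
--         (-1, -1),
--         (-1, 0),
--         (-1, 1),
--         (0, -1),
--         (0, 1),
--         (1, -1),
--         (1, 0),
--         (1, 1),
--     )
--     row, col = cell
--     neighbors = [
--         (row + row_offset, col + col_offset) for row_offset, col_offset in DIRECTIONS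
--     ]
--     return neighbors
-- ===== SOURCE B (Python) =====
-- def initialize_indegrees_by_roll(
--     paper_roll_grid: list[str],
-- ) -> dict[tuple[int, int], int]:
--     g = paper_roll_grid
--
--     # per-row prefix sums: prefix[r][i] = number of '@' among g[r][:i]
--     prefix = []
--     for s in g:
--         acc = [0]
--         t = 0
--         for ch in s:
--             t += 1 if ch == "@" else 0
--             acc.append(t)
--         prefix.append(acc)
--
--     def window(r: int, c: int) -> int:
--         # number of '@' in row r within columns [c-1, c+1]
--         if r < 0 or r >= len(g):
--             return 0
--         p = prefix[r]
--         lo = max(c - 1, 0)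
--         hi = min(c + 2, len(p) - 1)
--         if lo >= hi:
--             return 0
--         return p[hi] - p[lo]
--
--     result = {}
--     for r, s in enumerate(g):
--         for c, ch in enumerate(s):
--             if ch == "@":
--                 # 3x3 block count minus the cell itself
--                 result[(r, c)] = (
--                     window(r - 1, c) + window(r, c) + window(r + 1, c) - 1
--                 )
--     return result
-- ===== Notes on version B (the rewrite author's own statement) =====
-- stated objective: alternative
-- what changed: B replaces A's dict of zero-marked rolls plus a second gather pass probing all 8 neighbors per roll by per-row prefix sums of '@' counts: each roll's indegree is read off as three O(1) sliding-window differences (the 3x3 block count) minus 1, with no neighbor enumeration or dict membership tests at all.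
import Mathlib
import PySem

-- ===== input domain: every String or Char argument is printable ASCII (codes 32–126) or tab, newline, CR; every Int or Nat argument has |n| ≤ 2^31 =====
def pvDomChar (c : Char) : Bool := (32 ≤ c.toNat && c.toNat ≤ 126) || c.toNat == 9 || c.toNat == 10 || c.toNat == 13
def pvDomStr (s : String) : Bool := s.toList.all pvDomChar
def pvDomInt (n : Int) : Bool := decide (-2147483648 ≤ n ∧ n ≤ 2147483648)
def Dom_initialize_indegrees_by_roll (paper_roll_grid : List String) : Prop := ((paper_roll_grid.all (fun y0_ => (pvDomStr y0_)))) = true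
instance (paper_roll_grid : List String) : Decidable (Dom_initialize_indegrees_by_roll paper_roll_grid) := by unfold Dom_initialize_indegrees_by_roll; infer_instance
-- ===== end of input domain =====

-- B replaces A's zero-dict plus 8-neighbor gather pass by per-row prefix sums of '@' counts:
-- each roll's indegree is the 3x3 block count, read off as three O(1) window differences,
-- minus 1 (objective: alternative; equivalence is about the return value, no argument is mutated).

-- ===== PORT A =====
def pvDirections : List (Int × Int) :=
  [(-1, -1), (-1, 0), (-1, 1), (0, -1), (0, 1), (1, -1), (1, 0), (1, 1)]

def pvGetNeighbors (cell : Int × Int) : List (Int × Int) :=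
  pvDirections.map (fun d => (cell.1 + d.1, cell.2 + d.2))

def pvCalcIndegree (cell : Int × Int) (indegrees_by_roll : PySem.Dict (Int × Int) Int) : Int :=
  (pvGetNeighbors cell).foldl
    (fun indegree neighbor =>
      if !(indegrees_by_roll.contains neighbor) then indegree else indegree + 1) 0

-- first pass of A: mark every '@' cell with 0
def pvMark (paper_roll_grid : List String) : PySem.Dict (Int × Int) Int :=
  (PySem.List.enumerate paper_roll_grid 0).foldl
    (fun d rs =>
      (PySem.List.enumerate rs.2.toList 0).foldl
        (fun d cc => if cc.2 = '@' then d.insert (rs.1, cc.1) 0 else d) d)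
    PySem.Dict.empty

def initialize_indegrees_by_roll (paper_roll_grid : List String) : List (Int × Int × Int) :=
  let d0 := pvMark paper_roll_grid
  -- 'for roll in indegrees_by_roll: indegrees_by_roll[roll] = calc_indegree(roll, …)'
  let d1 := d0.keys.foldl (fun d roll => d.insert roll (pvCalcIndegree roll d)) d0
  -- the returned dict[(int,int),int] as a flat association list (type bridge)
  d1.items.map (fun p => (p.1.1, p.1.2, p.2))

-- ===== PORT B =====
-- per-row prefix sums: (pvPrefixRow s)[i] = number of '@' among s[:i], built left to right
def pvPrefixRow (s : String) : List Int :=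
  (s.toList.foldl
    (fun (st : List Int × Int) ch =>
      let t := st.2 + (if ch = '@' then 1 else 0)
      (st.1 ++ [t], t)) ([0], 0)).1

-- '@' count of row r within columns [c-1, c+1]; the two reads p[hi], p[lo] are always in
-- range when reached (0 ≤ lo < hi ≤ len p - 1), so getD 0 is exact for Python's p[hi], p[lo]
def pvWindow (g : List String) (pre : List (List Int)) (r c : Int) : Int :=
  if r < 0 ∨ (g.length : Int) ≤ r then 0
  else
    let p := (PySem.List.pyGet? pre r).getD []
    let lo := max (c - 1) 0
    let hi := min (c + 2) ((p.length : Int) - 1)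
    if hi ≤ lo then 0
    else (PySem.List.pyGet? p hi).getD 0 - (PySem.List.pyGet? p lo).getD 0

def initialize_indegrees_by_roll_alt (paper_roll_grid : List String) : List (Int × Int × Int) :=
  let pre := paper_roll_grid.map pvPrefixRow
  (PySem.List.enumerate paper_roll_grid 0).flatMap (fun rs =>
    (PySem.List.enumerate rs.2.toList 0).filterMap (fun cc =>
      if cc.2 = '@' then
        some (rs.1, cc.1,
          pvWindow paper_roll_grid pre (rs.1 - 1) cc.1
            + pvWindow paper_roll_grid pre rs.1 cc.1
            + pvWindow paper_roll_grid pre (rs.1 + 1) cc.1 - 1)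
      else none))

-- ===== PRECONDITION & SPEC =====
def Spec_initialize_indegrees_by_roll (paper_roll_grid : List String) (out : List (Int × Int × Int)) : Prop := out = initialize_indegrees_by_roll_alt paper_roll_grid
instance (paper_roll_grid : List String) (out : List (Int × Int × Int)) : Decidable (Spec_initialize_indegrees_by_roll paper_roll_grid out) := by unfold Spec_initialize_indegrees_by_roll; infer_instance

-- ===== CLAIM (what is proved, stated in full; the proofs are below) =====
def Claim_equal_initialize_indegrees_by_roll : Prop := ∀ (paper_roll_grid : List String), Dom_initialize_indegrees_by_roll paper_roll_grid → Spec_initialize_indegrees_by_roll paper_roll_grid (initialize_indegrees_by_roll paper_roll_grid)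

-- ===== LEMMAS AND PROOFS =====

-- whether grid cell (r, c) holds '@' (bounds-checked)
def pvIsRoll (g : List String) (r c : Int) : Bool :=
  decide (0 ≤ r) && decide (r < (g.length : Int)) &&
    ((PySem.List.pyGet? g r).elim false (fun row =>
      decide (0 ≤ c) && decide (c < PySem.Str.len row) &&
        (PySem.Str.pyGet? row c == some '@')))

-- 8-neighbor count of (r, c), as a plain sum
def pvCnt (g : List String) (r c : Int) : Int :=
  (if pvIsRoll g (r - 1) (c - 1) then 1 else 0) + (if pvIsRoll g (r - 1) c then 1 else 0)
    + (if pvIsRoll g (r - 1) (c + 1) then 1 else 0) + (if pvIsRoll g r (c - 1) then 1 else 0)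
    + (if pvIsRoll g r (c + 1) then 1 else 0) + (if pvIsRoll g (r + 1) (c - 1) then 1 else 0)
    + (if pvIsRoll g (r + 1) c then 1 else 0) + (if pvIsRoll g (r + 1) (c + 1) then 1 else 0)

-- the '@' cells of one row / of the whole grid, in scan order
def pvRollRow (r : Int) (cs : List Char) (c0 : Int) : List (Int × Int) :=
  (PySem.List.enumerate cs c0).filterMap (fun cc => if cc.2 = '@' then some (r, cc.1) else none)

def pvRollCells (g : List String) : List (Int × Int) :=
  (PySem.List.enumerate g 0).flatMap (fun rs => pvRollRow rs.1 rs.2.toList 0)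

theorem pvMark_row (cs : List Char) (c0 r : Int) (d : PySem.Dict (Int × Int) Int)
    (h : ∀ c, d.contains (r, c) = true → c < c0) :
    ((PySem.List.enumerate cs c0).foldl
      (fun d cc => if cc.2 = '@' then d.insert (r, cc.1) 0 else d) d).items
      = d.items ++ (pvRollRow r cs c0).map (fun k => (k, (0 : Int))) := by
  induction cs generalizing c0 d with
  | nil => simp [PySem.List.enumerate_nil, pvRollRow]
  | cons ch cs ih =>
    have hrr : pvRollRow r (ch :: cs) c0
        = (if ch = '@' then [(r, c0)] else []) ++ pvRollRow r cs (c0 + 1) := by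
      by_cases hch : ch = '@' <;>
        simp [pvRollRow, PySem.List.enumerate_cons, hch]
    have hstep : (if (c0, ch).2 = '@' then d.insert (r, (c0, ch).1) (0 : Int) else d)
        = if ch = '@' then d.insert (r, c0) 0 else d := rfl
    rw [PySem.List.enumerate_cons, List.foldl_cons, hstep, hrr]
    by_cases hch : ch = '@'
    · have hnc : d.contains (r, c0) = false := by
        cases hcc : d.contains (r, c0) with
        | false => rfl
        | true => exact absurd (h c0 hcc) (lt_irrefl c0)
      have h' : ∀ c, (d.insert (r, c0) (0 : Int)).contains (r, c) = true → c < c0 + 1 := by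
        intro c hc
        rw [PySem.Dict.contains_insert] at hc
        rcases Bool.or_eq_true_iff.mp hc with hc | hc
        · have hcc : (r, c) = (r, c0) := beq_iff_eq.mp hc
          have : c = c0 := congrArg Prod.snd hcc
          omega
        · have := h c hc; omega
      rw [if_pos hch, ih (c0 + 1) _ h',
        PySem.Dict.items_insert_of_not_contains d 0 hnc, if_pos hch]
      simp
    · have h' : ∀ c, d.contains (r, c) = true → c < c0 + 1 := by
        intro c hc; have := h c hc; omega
      rw [if_neg hch, if_neg hch, ih (c0 + 1) _ h']
      simp

theorem pvMem_rollRow (r' : Int) (cs : List Char) (c0 : Int) (p : Int × Int)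
    (hp : p ∈ pvRollRow r' cs c0) : p.1 = r' := by
  simp only [pvRollRow, List.mem_filterMap] at hp
  obtain ⟨cc, _, hsome⟩ := hp
  split at hsome
  · cases hsome; rfl
  · cases hsome

theorem pvMark_go (g : List String) (s : Int) (d : PySem.Dict (Int × Int) Int)
    (h : ∀ r c, d.contains (r, c) = true → r < s) :
    ((PySem.List.enumerate g s).foldl
      (fun d rs =>
        (PySem.List.enumerate rs.2.toList 0).foldl
          (fun d cc => if cc.2 = '@' then d.insert (rs.1, cc.1) 0 else d) d) d).items
      = d.items ++ ((PySem.List.enumerate g s).flatMap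
          (fun rs => pvRollRow rs.1 rs.2.toList 0)).map (fun k => (k, (0 : Int))) := by
  induction g generalizing s d with
  | nil => simp [PySem.List.enumerate_nil]
  | cons srow g ih =>
    rw [PySem.List.enumerate_cons, List.foldl_cons, List.flatMap_cons]
    have h0 : ∀ c, d.contains (s, c) = true → c < 0 := by
      intro c hc; exact absurd (h s c hc) (lt_irrefl s)
    have hinner := pvMark_row srow.toList 0 s d h0
    set d1 := (PySem.List.enumerate srow.toList 0).foldl
      (fun d cc => if cc.2 = '@' then d.insert (s, cc.1) 0 else d) d with hd1
    have h1 : ∀ r c, d1.contains (r, c) = true → r < s + 1 := by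
      intro r c hc
      rw [PySem.Dict.contains_eq_decide_mem_keys, decide_eq_true_eq] at hc
      have hkeys : d1.keys = d.keys ++ (pvRollRow s srow.toList 0) := by
        have hid : ((fun (x : (Int × Int) × Int) => x.1) ∘ fun (k : Int × Int) => (k, (0 : Int)))
            = id := rfl
        simp only [PySem.Dict.keys, hinner, List.map_append, List.map_map, hid, List.map_id]
      rw [hkeys, List.mem_append] at hc
      rcases hc with hc | hc
      · have : d.contains (r, c) = true := by
          rw [PySem.Dict.contains_eq_decide_mem_keys, decide_eq_true_eq]; exact hc
        have := h r c this; omega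
      · have := pvMem_rollRow s srow.toList 0 _ hc; simp at this; omega
    rw [ih (s + 1) d1 h1, hinner]
    simp

theorem pvMark_items (g : List String) :
    (pvMark g).items = (pvRollCells g).map (fun k => (k, (0 : Int))) := by
  have := pvMark_go g 0 PySem.Dict.empty (by intro r c hc; simp [PySem.Dict.contains_empty] at hc)
  simpa [pvMark, pvRollCells] using this

theorem pvMark_keys (g : List String) : (pvMark g).keys = pvRollCells g := by
  have hid : ((fun (x : (Int × Int) × Int) => x.1) ∘ fun (k : Int × Int) => (k, (0 : Int)))
      = id := rfl
  simp only [PySem.Dict.keys, pvMark_items, List.map_map, hid, List.map_id]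

theorem pvMark_contains (g : List String) (p : Int × Int) :
    (pvMark g).contains p = decide (p ∈ pvRollCells g) := by
  rw [PySem.Dict.contains_eq_decide_mem_keys, pvMark_keys]

theorem pvIsRoll_iff (g : List String) (r c : Int) :
    pvIsRoll g r c = true ↔
      ∃ (k : Nat) (hk : k < g.length), r = (k : Int) ∧
        ∃ (j : Nat) (hj : j < (g[k]).toList.length), c = (j : Int) ∧ (g[k]).toList[j] = '@' := by
  constructor
  · intro hb
    unfold pvIsRoll at hb
    have hr0 : 0 ≤ r := by by_contra hcon; simp [hcon] at hb
    have hrl : r < (g.length : Int) := by by_contra hcon; simp [hcon] at hb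
    set k := r.toNat with hkdef
    have hrk : r = (k : Int) := by omega
    have hkl : k < g.length := by omega
    have hget : PySem.List.pyGet? g r = some g[k] := by
      rw [hrk, PySem.List.pyGet?_natCast]
      simp [List.getElem?_eq_getElem hkl]
    rw [hget, Option.elim_some] at hb
    simp only [Bool.and_eq_true, beq_iff_eq, decide_eq_true_eq] at hb
    obtain ⟨-, ⟨hc0, hcl⟩, hch⟩ := hb
    rw [PySem.Str.len] at hcl
    set j := c.toNat with hjdef
    have hcj : c = (j : Int) := by omega
    have hjl : j < (g[k]).toList.length := by omega
    refine ⟨k, hkl, hrk, j, hjl, hcj, ?_⟩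
    rw [hcj] at hch
    simp only [PySem.Str.pyGet?, PySem.Chars.pyGet?, PySem.List.pyGet?_natCast,
      List.getElem?_eq_getElem hjl] at hch
    exact Option.some.inj hch
  · rintro ⟨k, hk, rfl, j, hj, rfl, hch⟩
    have hget : PySem.List.pyGet? g (k : Int) = some g[k] := by
      rw [PySem.List.pyGet?_natCast]; simp [List.getElem?_eq_getElem hk]
    have hget2 : PySem.Str.pyGet? g[k] (j : Int) = some '@' := by
      simp only [PySem.Str.pyGet?, PySem.Chars.pyGet?, PySem.List.pyGet?_natCast,
        List.getElem?_eq_getElem hj, hch]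
    unfold pvIsRoll
    rw [hget, Option.elim_some, hget2]
    simp only [PySem.Str.len, Bool.and_eq_true, decide_eq_true_eq, beq_self_eq_true, and_true]
    refine ⟨⟨by positivity, by exact_mod_cast hk⟩, by positivity, by exact_mod_cast hj⟩

theorem pvMem_rollCells_iff (g : List String) (r c : Int) :
    (r, c) ∈ pvRollCells g ↔ pvIsRoll g r c = true := by
  rw [pvIsRoll_iff]
  simp only [pvRollCells, List.mem_flatMap, PySem.List.mem_enumerate_iff]
  constructor
  · rintro ⟨rs, ⟨k, hk, rfl⟩, hmem⟩
    simp only [pvRollRow, List.mem_filterMap, PySem.List.mem_enumerate_iff] at hmem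
    obtain ⟨cc, ⟨j, hj, rfl⟩, hsome⟩ := hmem
    split at hsome
    · rename_i hch
      cases hsome
      exact ⟨k, hk, by omega, j, hj, by omega, hch⟩
    · cases hsome
  · rintro ⟨k, hk, rfl, j, hj, rfl, hch⟩
    refine ⟨((k : Int), g[k]), ⟨k, hk, by simp⟩, ?_⟩
    simp only [pvRollRow, List.mem_filterMap]
    refine ⟨((j : Int), (g[k]).toList[j]), ?_, ?_⟩
    · rw [PySem.List.mem_enumerate_iff]; exact ⟨j, hj, by simp⟩
    · simp [hch]

-- the update loop with all keys present rewrites every value in place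
theorem pvUpdate_items (ks : List (Int × Int)) (d : PySem.Dict (Int × Int) Int)
    (v : Int × Int → Int) (h : ∀ k ∈ ks, d.contains k = true) :
    (ks.foldl (fun d k => d.insert k (v k)) d).items
      = d.items.map (fun p => if p.1 ∈ ks then (p.1, v p.1) else p) := by
  induction ks generalizing d with
  | nil => simp
  | cons k ks ih =>
    rw [List.foldl_cons]
    have hk := h k (List.mem_cons_self)
    have h' : ∀ k' ∈ ks, (d.insert k (v k)).contains k' = true := by
      intro k' hk'
      rw [PySem.Dict.contains_insert]
      simp [h k' (List.mem_cons_of_mem _ hk')]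
    rw [ih _ h', PySem.Dict.items_insert_of_contains d (v k) hk, List.map_map]
    apply List.map_congr_left
    intro p _
    by_cases hpk : p.1 = k
    · have hbeq : (p.1 == k) = true := beq_iff_eq.mpr hpk
      simp [Function.comp, hpk, List.mem_cons]
    · have hbeq : (p.1 == k) = false := by simp [hpk]
      simp [Function.comp, hbeq, hpk, List.mem_cons]

-- pvCalcIndegree only reads 'contains', which the update loop never changes
theorem pvUpdate_calc (ks : List (Int × Int)) (d d0 : PySem.Dict (Int × Int) Int)
    (hc : ∀ j, d.contains j = d0.contains j) (h : ∀ k ∈ ks, d0.contains k = true) :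
    ks.foldl (fun d k => d.insert k (pvCalcIndegree k d)) d
      = ks.foldl (fun d k => d.insert k (pvCalcIndegree k d0)) d := by
  induction ks generalizing d with
  | nil => rfl
  | cons k ks ih =>
    rw [List.foldl_cons, List.foldl_cons]
    have hcalc : pvCalcIndegree k d = pvCalcIndegree k d0 := by
      unfold pvCalcIndegree; simp only [hc]
    rw [hcalc]
    have hc' : ∀ j, (d.insert k (pvCalcIndegree k d0)).contains j = d0.contains j := by
      intro j
      rw [PySem.Dict.contains_insert, hc j]
      cases hjk : (j == k) with
      | false => simp
      | true =>
        have hj : j = k := beq_iff_eq.mp hjk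
        simp [hj, h k (List.mem_cons_self)]
    exact ih _ hc' (fun k' hk' => h k' (List.mem_cons_of_mem _ hk'))

theorem pvCount_eq (g : List String) (r c : Int) :
    pvCalcIndegree (r, c) (pvMark g) = pvCnt g r c := by
  have hcont : ∀ a b : Int, (pvMark g).contains (a, b) = pvIsRoll g a b := by
    intro a b
    rw [pvMark_contains, Bool.eq_iff_iff]
    simp [pvMem_rollCells_iff]
  simp only [pvCalcIndegree, pvGetNeighbors, pvDirections, pvCnt, List.map_cons, List.map_nil,
    List.foldl_cons, List.foldl_nil, hcont]
  have e1 : r + -1 = r - 1 := by ring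
  have e2 : c + -1 = c - 1 := by ring
  have e3 : r + 0 = r := by ring
  have e4 : c + 0 = c := by ring
  rw [e1, e2, e3, e4]
  cases h1 : pvIsRoll g (r - 1) (c - 1) <;>
  cases h2 : pvIsRoll g (r - 1) c <;>
  cases h3 : pvIsRoll g (r - 1) (c + 1) <;>
  cases h4 : pvIsRoll g r (c - 1) <;>
  cases h5 : pvIsRoll g r (c + 1) <;>
  cases h6 : pvIsRoll g (r + 1) (c - 1) <;>
  cases h7 : pvIsRoll g (r + 1) c <;>
  cases h8 : pvIsRoll g (r + 1) (c + 1) <;>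
  simp_all

-- B's result in scan order
theorem pvAlt_eq (g : List String) :
    initialize_indegrees_by_roll_alt g
      = (pvRollCells g).map (fun k =>
          (k.1, k.2,
            pvWindow g (g.map pvPrefixRow) (k.1 - 1) k.2
              + pvWindow g (g.map pvPrefixRow) k.1 k.2
              + pvWindow g (g.map pvPrefixRow) (k.1 + 1) k.2 - 1)) := by
  have hz : initialize_indegrees_by_roll_alt g
      = (PySem.List.enumerate g 0).flatMap (fun rs =>
          (PySem.List.enumerate rs.2.toList 0).filterMap (fun cc =>
            if cc.2 = '@' then
              some (rs.1, cc.1,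
                pvWindow g (g.map pvPrefixRow) (rs.1 - 1) cc.1
                  + pvWindow g (g.map pvPrefixRow) rs.1 cc.1
                  + pvWindow g (g.map pvPrefixRow) (rs.1 + 1) cc.1 - 1)
            else none)) := rfl
  rw [hz]
  unfold pvRollCells
  rw [List.map_flatMap]
  congr 1
  funext rs
  simp only [pvRollRow]
  rw [List.map_filterMap]
  apply List.filterMap_congr
  intro cc _
  by_cases hch : cc.2 = '@' <;> simp [hch]

-- ----- prefix-sum characterisation -----

-- count of '@' in cs[:i], as Int
def pvCntP (cs : List Char) (i : Nat) : Int := ((cs.take i).countP (fun ch => ch == '@') : Int)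

theorem pvPrefixRow_aux (cs : List Char) (acc : List Int) (t : Int) :
    (cs.foldl
      (fun (st : List Int × Int) ch =>
        ((st.1 ++ [st.2 + (if ch = '@' then 1 else 0)], st.2 + (if ch = '@' then 1 else 0)) :
          List Int × Int)) (acc, t)).1
      = acc ++ (List.range cs.length).map (fun i => t + pvCntP cs (i + 1)) := by
  induction cs generalizing acc t with
  | nil => simp
  | cons ch cs ih =>
    rw [List.foldl_cons]
    show (cs.foldl _ (acc ++ [t + (if ch = '@' then 1 else 0)], t + (if ch = '@' then 1 else 0))).1
      = _
    rw [ih]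
    rw [List.length_cons, List.range_succ_eq_map, List.map_cons, List.map_map,
      List.append_assoc]
    congr 1
    have hhead : pvCntP (ch :: cs) 1 = (if ch = '@' then 1 else 0) := by
      by_cases hch : ch = '@' <;> simp [pvCntP, hch]
    have htail : ∀ i : Nat, pvCntP (ch :: cs) (i + 1 + 1)
        = (if ch = '@' then 1 else 0) + pvCntP cs (i + 1) := by
      intro i
      by_cases hch : ch = '@' <;>
        simp [pvCntP, List.take_succ_cons, List.countP_cons, hch] <;> push_cast <;> ring
    simp only [List.cons_append, List.nil_append, hhead]
    congr 1
    apply List.map_congr_left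
    intro i _
    simp only [Function.comp, htail]
    ring

theorem pvPrefixRow_eq (s : String) :
    pvPrefixRow s = (List.range (s.toList.length + 1)).map (fun i => pvCntP s.toList i) := by
  unfold pvPrefixRow
  have := pvPrefixRow_aux s.toList [0] 0
  rw [show (s.toList.foldl
      (fun (st : List Int × Int) ch =>
        let t := st.2 + (if ch = '@' then 1 else 0); (st.1 ++ [t], t)) ([0], 0))
      = (s.toList.foldl
      (fun (st : List Int × Int) ch =>
        ((st.1 ++ [st.2 + (if ch = '@' then 1 else 0)], st.2 + (if ch = '@' then 1 else 0)) :
          List Int × Int)) ([0], 0)) from rfl, this]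
  rw [List.range_succ_eq_map, List.map_cons, List.map_map]
  simp [pvCntP]

theorem pvCntP_succ (cs : List Char) (p : Nat) (hp : p < cs.length) :
    pvCntP cs (p + 1) = pvCntP cs p + (if cs[p] = '@' then 1 else 0) := by
  rw [pvCntP, pvCntP, List.take_succ, List.getElem?_eq_getElem hp, Option.toList_some,
    List.countP_append]
  by_cases hch : cs[p] = '@' <;> simp [hch]

theorem pvCntP_clamp (cs : List Char) (i : Nat) (hi : cs.length ≤ i) :
    pvCntP cs i = pvCntP cs cs.length := by
  rw [pvCntP, pvCntP, List.take_of_length_le hi, List.take_length]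

-- reading the prefix list at an in-range position
theorem pvPrefix_get (s : String) (i : Int) (h0 : 0 ≤ i) (hle : i ≤ (s.toList.length : Int)) :
    (PySem.List.pyGet? (pvPrefixRow s) i).getD 0 = pvCntP s.toList i.toNat := by
  rw [pvPrefixRow_eq]
  have hi : i = ((i.toNat : Nat) : Int) := by omega
  rw [hi, PySem.List.pyGet?_natCast]
  have hlt : i.toNat < ((List.range (s.toList.length + 1)).map (fun j => pvCntP s.toList j)).length := by
    simp only [List.length_map, List.length_range]; omega
  rw [List.getElem?_eq_getElem hlt]
  simp only [Option.getD_some, List.getElem_map, List.getElem_range]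
  rw [Int.toNat_natCast]

-- one row's window equals the clipped three-cell indicator sum
theorem pvWindow_eq (g : List String) (r c : Int) (hc : 0 ≤ c) :
    pvWindow g (g.map pvPrefixRow) r c
      = (if pvIsRoll g r (c - 1) then 1 else 0) + (if pvIsRoll g r c then 1 else 0)
        + (if pvIsRoll g r (c + 1) then 1 else 0) := by
  by_cases hr : r < 0 ∨ (g.length : Int) ≤ r
  · have hfalse : ∀ c' : Int, pvIsRoll g r c' = false := by
      intro c'
      cases hb : pvIsRoll g r c' with
      | false => rfl
      | true =>
        obtain ⟨k, hk, hrk, -⟩ := (pvIsRoll_iff g r c').mp hb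
        exact absurd hrk (by rcases hr with hr | hr <;> omega)
    rw [pvWindow, if_pos hr]
    simp [hfalse]
  · push_neg at hr
    obtain ⟨hr0, hrl⟩ := hr
    set k := r.toNat with hkdef
    have hrk : r = (k : Int) := by omega
    have hkl : k < g.length := by omega
    have hpre : PySem.List.pyGet? (g.map pvPrefixRow) r = some (pvPrefixRow g[k]) := by
      rw [hrk, PySem.List.pyGet?_natCast]
      simp [List.getElem?_eq_getElem (by simpa using hkl : k < (g.map pvPrefixRow).length)]
    set cs := (g[k]).toList with hcs
    set n := cs.length with hn
    have hplen : (pvPrefixRow g[k]).length = n + 1 := by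
      rw [pvPrefixRow_eq]; simp [hn, hcs]
    -- the three-cell indicator sum, via in-range characterisation of pvIsRoll in row k
    have hrow : ∀ c' : Int, pvIsRoll g r c' = true
        ↔ ((0 ≤ c' ∧ c' < (n : Int)) ∧ cs[c'.toNat]? = some '@') := by
      intro c'
      rw [pvIsRoll_iff]
      constructor
      · rintro ⟨k', hk', hrk', j, hj, rfl, hch⟩
        have : k' = k := by omega
        subst this
        refine ⟨⟨by positivity, by exact_mod_cast hj⟩, ?_⟩
        rw [show ((j : Int)).toNat = j by omega, List.getElem?_eq_getElem hj]
        simpa using hch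
      · rintro ⟨⟨h0, hl⟩, hch⟩
        have hj : c'.toNat < n := by omega
        refine ⟨k, hkl, hrk, c'.toNat, hj, by omega, ?_⟩
        rw [List.getElem?_eq_getElem hj] at hch
        simpa using hch
    have hindI : ∀ c' : Int, (if pvIsRoll g r c' then (1 : Int) else 0)
        = (if (0 ≤ c' ∧ c' < (n : Int)) ∧ cs[c'.toNat]? = some '@' then 1 else 0) := by
      intro c'
      by_cases hb : pvIsRoll g r c' = true
      · rw [if_pos hb, if_pos ((hrow c').mp hb)]
      · rw [if_neg hb, if_neg (fun h => hb ((hrow c').mpr h))]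
    have hcount : ∀ p : Nat, (hp : p < cs.length) →
        (if pvIsRoll g r (p : Int) then (1 : Int) else 0)
          = (if cs[p] = '@' then 1 else 0) := by
      intro p hp
      have hp2 : (0 ≤ (p : Int) ∧ (p : Int) < (n : Int)) := ⟨by positivity, by omega⟩
      rw [hindI, show ((p : Int)).toNat = p by omega, List.getElem?_eq_getElem hp]
      by_cases hch : cs[p] = '@'
      · rw [if_pos hch, if_pos ⟨hp2, by rw [hch]⟩]
      · rw [if_neg hch, if_neg (fun h => hch (by simpa using h.2))]
    rw [pvWindow, if_neg (by omega), hpre]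
    simp only [Option.getD_some, hplen]
    have hget := pvPrefix_get g[k]
    rw [← hcs, ← hn] at hget
    -- case analysis on the window clipping
    obtain ⟨j, rfl⟩ : ∃ j : Nat, c = (j : Int) := ⟨c.toNat, by omega⟩
    by_cases hn0 : n ≤ j - 1 ∨ (j = 0 ∧ n = 0)
    · -- window empty: hi ≤ lo
      have hle : min ((j : Int) + 2) (((n : Int) + 1) - 1) ≤ max ((j : Int) - 1) 0 := by omega
      rw [if_pos (by push_cast; push_cast at hle; omega)]
      have hz : ∀ c' : Int, (j : Int) - 1 ≤ c' → (if pvIsRoll g r c' then (1 : Int) else 0) = 0 := by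
        intro c' hc'
        rw [hindI]
        rcases hn0 with hn0 | ⟨hj0, hn0⟩ <;>
          · rw [if_neg]; rintro ⟨⟨h0, hl⟩, -⟩; omega
      rw [hz _ (by omega), hz _ (by omega), hz _ (by omega)]
      ring
    · push_neg at hn0
      have hwin : ¬ (min ((j : Int) + 2) (((n : Int) + 1) - 1) ≤ max ((j : Int) - 1) 0) := by omega
      rw [if_neg (by push_cast; push_cast at hwin; omega)]
      push_cast
      set lo : Int := max ((j : Int) - 1) 0 with hlo
      set hi : Int := min ((j : Int) + 2) ((n : Int) + 1 - 1) with hhi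
      have hlo0 : 0 ≤ lo := by omega
      have hhin : hi ≤ (n : Int) := by omega
      have hlohi : lo < hi := by omega
      rw [hget hi (by omega) (by omega), hget lo (by omega) (by omega)]
      -- uniform telescoping via the doubly-clamped prefix function F
      set F : Int → Int := fun i => pvCntP cs i.toNat with hF
      have hstepF : ∀ p : Int, F (p + 1) - F p = (if pvIsRoll g r p then (1 : Int) else 0) := by
        intro p
        by_cases hp0 : p < 0
        · rw [hindI, if_neg (by rintro ⟨⟨h0, -⟩, -⟩; omega)]
          simp only [hF]
          rw [show (p + 1).toNat = 0 by omega, show p.toNat = 0 by omega]; ring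
        · by_cases hpn : (n : Int) ≤ p
          · rw [hindI, if_neg (by rintro ⟨⟨-, hl⟩, -⟩; omega)]
            simp only [hF]
            rw [pvCntP_clamp cs (p + 1).toNat (by omega), pvCntP_clamp cs p.toNat (by omega)]
            ring
          · have hplt : p.toNat < n := by omega
            have h1 := hcount p.toNat hplt
            rw [show ((p.toNat : Nat) : Int) = p by omega] at h1
            simp only [hF]
            rw [show (p + 1).toNat = p.toNat + 1 by omega,
              pvCntP_succ cs p.toNat (by omega), h1]
            ring
      have hFlo : F lo = F ((j : Int) - 1) := by
        simp only [hF]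
        rw [show lo.toNat = ((j : Int) - 1).toNat by omega]
      have hFhi : F hi = F ((j : Int) + 2) := by
        simp only [hF]
        by_cases hcase : (j : Int) + 2 ≤ (n : Int)
        · rw [show hi.toNat = ((j : Int) + 2).toNat by omega]
        · rw [show hi.toNat = n by omega, show ((j : Int) + 2).toNat = j + 2 by omega,
            pvCntP_clamp cs (j + 2) (by omega), ← hn]
      have h1 := hstepF ((j : Int) - 1)
      have h2 := hstepF (j : Int)
      have h3 := hstepF ((j : Int) + 1)
      rw [show (j : Int) - 1 + 1 = (j : Int) by ring] at h1
      rw [show (j : Int) + 1 + 1 = (j : Int) + 2 by ring] at h3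
      show F hi - F lo = _
      rw [hFhi, hFlo]
      omega

-- ===== VERDICT (by name: the statement is the Claim_ definition above) =====
theorem initialize_indegrees_by_roll_spec : Claim_equal_initialize_indegrees_by_roll := by
  intro g _
  unfold Spec_initialize_indegrees_by_roll
  simp only [initialize_indegrees_by_roll]
  rw [pvAlt_eq]
  have hcontkeys : ∀ k ∈ (pvMark g).keys, (pvMark g).contains k = true := by
    intro k hk
    rw [PySem.Dict.contains_eq_decide_mem_keys, decide_eq_true_eq]; exact hk
  rw [pvUpdate_calc _ _ _ (fun j => rfl) hcontkeys, pvUpdate_items _ _ _ hcontkeys,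
    List.map_map, pvMark_items, pvMark_keys, List.map_map]
  apply List.map_congr_left
  intro k hk
  simp only [Function.comp]
  rw [if_pos hk]
  show (k.1, k.2, pvCalcIndegree k (pvMark g))
    = (k.1, k.2, pvWindow g (g.map pvPrefixRow) (k.1 - 1) k.2
        + pvWindow g (g.map pvPrefixRow) k.1 k.2
        + pvWindow g (g.map pvPrefixRow) (k.1 + 1) k.2 - 1)
  have hroll : pvIsRoll g k.1 k.2 = true := by
    rw [← pvMem_rollCells_iff]; exact hk
  have hc0 : 0 ≤ k.2 := by
    obtain ⟨_, _, _, j, _, hj, _⟩ := (pvIsRoll_iff g k.1 k.2).mp hroll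
    omega
  rw [pvCount_eq, pvWindow_eq g _ _ hc0, pvWindow_eq g _ _ hc0, pvWindow_eq g _ _ hc0,
    pvCnt, hroll]
  simp only [if_true]
  ring
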